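-- pv_equiv track=rewrite | github.com/lufeidasheng/sanhua-system | core/gui_bridge/chat_orchestrator.py | _active_backend_entry
-- ===== SOURCE A (Python) =====
-- from typing import Any, Callable, Optional
--
-- def _active_backend_entry(backend_status: Any) -> tuple[str, dict]:
--     if not isinstance(backend_status, dict):
--         return "", {}
--     fallback = ("", {})
--     for name, entry in backend_status.items():
--         if not isinstance(entry, dict):
--             continue
--         if not fallback[1]:
--             fallback = (str(name or "").strip(), entry)
--         if entry.get("is_active"):
--             return str(name or "").strip(), entry
--     return fallback
-- ===== SOURCE B (Python) =====
-- def _active_backend_entry(backend_status):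
--     if not isinstance(backend_status, dict):
--         return "", {}
--     items = list(backend_status.items())
--     hit = next(((n, e) for n, e in items
--                 if isinstance(e, dict) and e.get("is_active")), None)
--     if hit is None:
--         hit = next(((n, e) for n, e in items
--                     if isinstance(e, dict) and e), None)
--     if hit is None:
--         return "", {}
--     name, entry = hit
--     return str(name or "").strip(), entry
-- ===== Notes on version B (the rewrite author's own statement) =====
-- stated objective: simpler
-- what changed: Replaced the single pass that threads a mutable fallback accumulator (with its overwrite-while-empty rule) by two plain find-first scans: first entry with truthy is_active, else first entry with a nonempty dict, else ('', {}).
-- intended difference: When every entry dict is empty (and the last name strips to something nonempty), A returns the LAST entry's stripped name paired with {} because its fallback keeps being overwritten by leftover loop state, while B returns ('', {}); with no usable backend at all the empty result is the intended value. — e.g. on _active_backend_entry([("local", [])]): A returns ("local", []), B returns ("", [])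
import Mathlib
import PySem

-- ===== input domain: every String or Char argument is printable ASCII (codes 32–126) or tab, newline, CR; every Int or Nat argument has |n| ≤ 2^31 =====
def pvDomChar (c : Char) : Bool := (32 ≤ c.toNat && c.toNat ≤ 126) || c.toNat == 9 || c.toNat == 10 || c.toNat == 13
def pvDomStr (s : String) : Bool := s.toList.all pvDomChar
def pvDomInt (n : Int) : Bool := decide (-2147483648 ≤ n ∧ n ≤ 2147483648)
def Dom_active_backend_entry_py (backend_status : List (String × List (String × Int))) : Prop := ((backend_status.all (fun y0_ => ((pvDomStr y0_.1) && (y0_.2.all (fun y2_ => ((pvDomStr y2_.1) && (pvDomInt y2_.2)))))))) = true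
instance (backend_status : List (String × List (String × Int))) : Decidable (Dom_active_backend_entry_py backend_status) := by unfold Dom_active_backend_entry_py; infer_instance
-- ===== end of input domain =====

-- B replaces A's one-pass fallback accumulator by two find-first scans (simpler); when all
-- entry dicts are empty B returns ("", {}) instead of A's leftover-loop-state last name (see D_).

-- ===== PORT A =====
-- entry.get("is_active") on the association list = first match (List.lookup), exact for a
-- Python dict; truthiness of the Optional[int] result = present and nonzero.
def pvLoopA : List (String × List (String × Int)) → String × (List (String × Int)) → String × (List (String × Int))
  | [], fallback => fallback
  | (name, entry) :: rest, fallback =>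
    -- isinstance(entry, dict) always holds under the stated type
    let fallback' :=
      if fallback.2.isEmpty then
        (PySem.Str.strip (if name = "" then "" else name), entry)
      else fallback
    if ((entry.lookup "is_active").getD 0) != 0 then
      (PySem.Str.strip (if name = "" then "" else name), entry)
    else pvLoopA rest fallback'

def active_backend_entry_py (backend_status : List (String × List (String × Int))) : String × (List (String × Int)) :=
  pvLoopA backend_status ("", [])

-- ===== PORT B =====
def active_backend_entry_py_alt (backend_status : List (String × List (String × Int))) : String × (List (String × Int)) :=
  let hit := backend_status.find? (fun p => ((p.2.lookup "is_active").getD 0) != 0)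
  let hit := match hit with
    | some h => some h
    | none => backend_status.find? (fun p => !p.2.isEmpty)
  match hit with
  | some (name, entry) => (PySem.Str.strip (if name = "" then "" else name), entry)
  | none => ("", [])

-- ===== PRECONDITION & SPEC =====
-- When every entry dict is empty (and the last name strips to something nonempty), A returns the
-- LAST entry's stripped name paired with {} — its fallback keeps being overwritten by leftover
-- loop state — while B returns ("", {}); with no usable backend the empty result is intended.
def D_active_backend_entry_py (backend_status : List (String × List (String × Int))) : Prop :=
  backend_status ≠ [] ∧ (∀ p ∈ backend_status, p.2 = []) ∧
    PySem.Str.strip (backend_status.getLast!).1 ≠ ""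
instance (backend_status : List (String × List (String × Int))) : Decidable (D_active_backend_entry_py backend_status) := by unfold D_active_backend_entry_py; infer_instance

def Spec_active_backend_entry_py (backend_status : List (String × List (String × Int))) (out : String × (List (String × Int))) : Prop := ¬ D_active_backend_entry_py backend_status → out = active_backend_entry_py_alt backend_status
instance (backend_status : List (String × List (String × Int))) (out : String × (List (String × Int))) : Decidable (Spec_active_backend_entry_py backend_status out) := by unfold Spec_active_backend_entry_py; infer_instance

def pvDiffWitness_active_backend_entry_py : (List (String × List (String × Int))) := [("local", [])]
def pvDiffWitnessOut_active_backend_entry_py : (String × (List (String × Int))) × (String × (List (String × Int))) := (("local", []), ("", []))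

-- ===== CLAIM (what is proved, stated in full; the proofs are below) =====
def Claim_unchanged_active_backend_entry_py : Prop := ∀ (backend_status : List (String × List (String × Int))), Dom_active_backend_entry_py backend_status → Spec_active_backend_entry_py backend_status (active_backend_entry_py backend_status)
def Claim_changed_active_backend_entry_py : Prop := Dom_active_backend_entry_py (pvDiffWitness_active_backend_entry_py) ∧ D_active_backend_entry_py (pvDiffWitness_active_backend_entry_py) ∧ active_backend_entry_py (pvDiffWitness_active_backend_entry_py) = pvDiffWitnessOut_active_backend_entry_py.1 ∧ active_backend_entry_py_alt (pvDiffWitness_active_backend_entry_py) = pvDiffWitnessOut_active_backend_entry_py.2 ∧ pvDiffWitnessOut_active_backend_entry_py.1 ≠ pvDiffWitnessOut_active_backend_entry_py.2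
def Claim_exact_active_backend_entry_py : Prop := ∀ (backend_status : List (String × List (String × Int))), Dom_active_backend_entry_py backend_status → D_active_backend_entry_py backend_status → active_backend_entry_py backend_status ≠ active_backend_entry_py_alt backend_status

-- ===== LEMMAS AND PROOFS =====

-- abbreviations used only in proofs
def pvActive (p : String × List (String × Int)) : Bool := ((p.2.lookup "is_active").getD 0) != 0
def pvStrip (n : String) : String := PySem.Str.strip (if n = "" then "" else n)

-- if some entry is active, A returns the first active one regardless of the fallback
theorem pvLoopA_active (bs : List (String × List (String × Int))) (n : String)
    (e : List (String × Int)) (h : bs.find? pvActive = some (n, e)) (fb : String × (List (String × Int))) :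
    pvLoopA bs fb = (pvStrip n, e) := by
  induction bs generalizing fb with
  | nil => simp at h
  | cons hd tl ih =>
    obtain ⟨hn, he⟩ := hd
    rw [List.find?_cons] at h
    by_cases ha : pvActive (hn, he)
    · rw [ha] at h
      simp only [Option.some.injEq, Prod.mk.injEq] at h
      obtain ⟨h1, h2⟩ := h
      subst h1; subst h2
      simp only [pvLoopA]
      rw [if_pos (show ((((he.lookup "is_active").getD 0) != 0) = true) from ha)]
      simp [pvStrip]
    · have ha' : pvActive (hn, he) = false := by simpa using ha
      rw [ha'] at h
      simp only [] at h
      simp only [pvLoopA]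
      rw [if_neg (show ¬ ((((he.lookup "is_active").getD 0) != 0) = true) from ha)]
      exact ih h _

-- with no active entry and a nonempty fallback, A returns the fallback unchanged
theorem pvLoopA_fixed (bs : List (String × List (String × Int)))
    (h : bs.find? pvActive = none) (fb : String × (List (String × Int))) (hfb : fb.2 ≠ []) :
    pvLoopA bs fb = fb := by
  induction bs with
  | nil => simp [pvLoopA]
  | cons hd tl ih =>
    obtain ⟨hn, he⟩ := hd
    rw [List.find?_cons] at h
    by_cases ha : pvActive (hn, he)
    · rw [ha] at h; simp at h
    · have ha' : pvActive (hn, he) = false := by simpa using ha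
      rw [ha'] at h
      simp only [] at h
      simp only [pvLoopA]
      rw [if_neg (show ¬ ((((he.lookup "is_active").getD 0) != 0) = true) from ha)]
      rw [if_neg (by simpa using hfb)]
      exact ih h

-- with no active entry and an empty fallback, A returns the first nonempty entry
theorem pvLoopA_fallback (bs : List (String × List (String × Int))) (n : String)
    (e : List (String × Int)) (hA : bs.find? pvActive = none)
    (h : bs.find? (fun p => !p.2.isEmpty) = some (n, e)) (fb : String × (List (String × Int)))
    (hfb : fb.2 = []) :
    pvLoopA bs fb = (pvStrip n, e) := by
  induction bs generalizing fb with
  | nil => simp at h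
  | cons hd tl ih =>
    obtain ⟨hn, he⟩ := hd
    rw [List.find?_cons] at h hA
    by_cases ha : pvActive (hn, he)
    · rw [ha] at hA; simp at hA
    · have ha' : pvActive (hn, he) = false := by simpa using ha
      rw [ha'] at hA
      simp only [] at hA
      simp only [pvLoopA]
      rw [if_neg (show ¬ ((((he.lookup "is_active").getD 0) != 0) = true) from ha),
        if_pos (by simp [hfb])]
      by_cases hne : he = []
      · have : (!(hn, he).2.isEmpty) = false := by simp [hne]
        rw [this] at h
        simp only [] at h
        exact ih hA h _ (by simpa using hne)
      · have : (!(hn, he).2.isEmpty) = true := by simp [hne]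
        rw [this] at h
        simp only [Option.some.injEq, Prod.mk.injEq] at h
        obtain ⟨h1, h2⟩ := h
        subst h1; subst h2
        rw [pvLoopA_fixed tl hA _ (by simpa using hne)]
        simp [pvStrip]

-- with every entry empty, A's fallback is overwritten at each step: last name wins
theorem pvLoopA_allEmpty (bs : List (String × List (String × Int)))
    (hall : ∀ p ∈ bs, p.2 = []) (fb : String × (List (String × Int))) (hfb : fb.2 = []) (hbs : bs ≠ []) :
    pvLoopA bs fb = (pvStrip (bs.getLast!).1, []) := by
  induction bs generalizing fb with
  | nil => simp at hbs
  | cons hd tl ih =>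
    obtain ⟨hn, he⟩ := hd
    have hhe : he = [] := hall (hn, he) (by simp)
    have hact : ¬ ((((he.lookup "is_active").getD 0) != 0) = true) := by simp [hhe]
    simp only [pvLoopA]
    rw [if_neg hact, if_pos (by simp [hfb])]
    rcases tl with _ | ⟨t, ts⟩
    · simp [pvLoopA, hhe, pvStrip, List.getLast!]
    · have := ih (fun p hp => hall p (by simp [hp]))
        (PySem.Str.strip (if hn = "" then "" else hn), he) (by simpa using hhe) (by simp)
      have hg : ((hn, he) :: t :: ts).getLast! = (t :: ts).getLast! := rfl
      rw [hg]
      exact this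

-- all entries empty ⇒ none is active
theorem pvFindActive_none_of_allEmpty (bs : List (String × List (String × Int)))
    (hall : ∀ p ∈ bs, p.2 = []) : bs.find? pvActive = none := by
  rw [List.find?_eq_none]
  intro p hp
  simp [pvActive, hall p hp]

theorem active_backend_entry_py_spec : Claim_unchanged_active_backend_entry_py := by
  intro bs _ hD
  show active_backend_entry_py bs = active_backend_entry_py_alt bs
  unfold active_backend_entry_py active_backend_entry_py_alt
  rcases hfa : bs.find? pvActive with _ | ⟨n, e⟩ <;>
    have hfa' : bs.find? (fun p : String × List (String × Int) =>
      ((p.2.lookup "is_active").getD 0) != 0) = bs.find? pvActive := rfl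
  · rcases hfn : bs.find? (fun p : String × List (String × Int) => !p.2.isEmpty) with _ | ⟨m, f⟩
    · -- no active, no nonempty entry: all entries are empty
      have hall : ∀ p ∈ bs, p.2 = [] := by
        rw [List.find?_eq_none] at hfn
        intro p hp
        simpa using hfn p hp
      rcases hbs : bs with _ | ⟨hd, tl⟩
      · simp [pvLoopA]
      · rw [← hbs]
        have hlast : PySem.Str.strip (bs.getLast!).1 = "" := by
          by_contra hne
          exact hD ⟨by simp [hbs], hall, hne⟩
        rw [pvLoopA_allEmpty bs hall _ rfl (by simp [hbs])]
        have hps : pvStrip (bs.getLast!).1 = "" := by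
          unfold pvStrip
          split
          · next h => rw [← h] at hlast ⊢; simpa using hlast
          · exact hlast
        rw [hps]
        simp [hfa', hfa]
    · -- no active entry: fallback = first nonempty entry
      rw [pvLoopA_fallback bs m f hfa hfn _ rfl]
      simp [hfa', hfa, pvStrip]
  · -- first active entry wins in both
    rw [pvLoopA_active bs n e hfa]
    simp [hfa', hfa, pvStrip]

theorem active_backend_entry_py_changed : Claim_changed_active_backend_entry_py := by
  unfold Claim_changed_active_backend_entry_py; decide

theorem active_backend_entry_py_tight : Claim_exact_active_backend_entry_py := by
  intro bs _ hD heq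
  obtain ⟨hne, hall, hlast⟩ := hD
  have hfa := pvFindActive_none_of_allEmpty bs hall
  have hfa' : bs.find? (fun p : String × List (String × Int) =>
      ((p.2.lookup "is_active").getD 0) != 0) = none := hfa
  have hfn : bs.find? (fun p : String × List (String × Int) => !p.2.isEmpty) = none := by
    rw [List.find?_eq_none]
    intro p hp
    simp [hall p hp]
  have hA : active_backend_entry_py bs = (pvStrip (bs.getLast!).1, []) := by
    unfold active_backend_entry_py
    exact pvLoopA_allEmpty bs hall _ rfl hne
  have hB : active_backend_entry_py_alt bs = ("", []) := by
    unfold active_backend_entry_py_alt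
    simp [hfa', hfn]
  rw [hA, hB] at heq
  have hps : pvStrip (bs.getLast!).1 = "" := congrArg Prod.fst heq
  apply hlast
  unfold pvStrip at hps
  split at hps
  · next h => rw [h]; simpa using hps
  · exact hps
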